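-- pv_equiv track=rewrite | github.com/ji-in/2022_algorithm | programmers/셔틀버스_카카오L3/셔틀버스.py | solution
-- ===== SOURCE A (Python) =====
-- from collections import defaultdict
--
-- def make_time(t):
--     hour, minute = t//60, t%60
--     return str(hour).zfill(2) + ':' + str(minute).zfill(2)
--
-- def solution(n, t, m, timetable):
--     answer = ''
--     # 1. timetable 정렬
--     crews = []
--     for time in timetable:
--         hour, minute = int(time[:2]), int(time[3:])
--         crews.append(60*hour+minute)
--     crews.sort()
--     # 2. 셔틀버스 시간대 결정
--     buses = defaultdict(list)
--     bus_start = 60*9 # 9:00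
--     bus_timetable = []
--     for i in range(n):
--         buses[bus_start] = []
--         bus_timetable.append(bus_start)
--         bus_start += t
--
--     for crew in crews:
--         for bus in buses:
--             if crew <= bus and len(buses[bus]) < m:
--                 buses[bus].append(crew)
--                 break
--
--     late_time = bus_timetable[-1]
--     if len(buses[late_time]) < m: # 버스 자리 남을 때
--         return make_time(late_time)
--     else:
--         time = 0
--         crew_list = buses[late_time]
--         if m == 1:
--             time = crew_list[0] - 1
--         else:
--             time = crew_list[m-2]
--             if time < late_time:
--                 time = late_time
--             if time >= crew_list[m-1]:
--                 time = crew_list[m-1] - 1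
--         return make_time(time)
-- ===== SOURCE B (Python) =====
-- def make_time(t):
--     hour, minute = t//60, t%60
--     return str(hour).zfill(2) + ':' + str(minute).zfill(2)
--
-- def solution(n, t, m, timetable):
--     crews = sorted(60 * int(s[:2]) + int(s[3:]) for s in timetable)
--     bus_timetable = [9 * 60 + t * i for i in range(n)]
--     last_bus = bus_timetable[-1]
--     # single bus-outer sweep: each bus consumes a prefix of the remaining sorted crews
--     p = 0
--     last_list = []
--     for bus in bus_timetable:
--         cur = []
--         while p < len(crews) and crews[p] <= bus and len(cur) < m:
--             cur.append(crews[p])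
--             p += 1
--         last_list = cur
--     if len(last_list) < m:
--         return make_time(last_bus)
--     if m == 1:
--         return make_time(last_list[0] - 1)
--     time = max(last_list[m - 2], last_bus)
--     if time >= last_list[m - 1]:
--         time = last_list[m - 1] - 1
--     return make_time(time)
-- ===== Notes on version B (the rewrite author's own statement) =====
-- stated objective: faster
-- what changed: A's crew-outer loop scans the bus dict for every crew; B sorts the crews once and does a single bus-outer sweep in which each bus consumes a prefix of the remaining sorted crews, keeping only the last bus's list; Pre_ excludes t = 0 with n >= 2, where all bus times coincide and A's defaultdict collapses them into one key (one bus of capacity m) while B keeps n simultaneous buses - a duplicate-key corner where either reading is defensible.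
-- outside the precondition, e.g. on solution(2, 0, 1, ['08:00', '09:00']): A returns '07:59', B returns '08:59'
import Mathlib
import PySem

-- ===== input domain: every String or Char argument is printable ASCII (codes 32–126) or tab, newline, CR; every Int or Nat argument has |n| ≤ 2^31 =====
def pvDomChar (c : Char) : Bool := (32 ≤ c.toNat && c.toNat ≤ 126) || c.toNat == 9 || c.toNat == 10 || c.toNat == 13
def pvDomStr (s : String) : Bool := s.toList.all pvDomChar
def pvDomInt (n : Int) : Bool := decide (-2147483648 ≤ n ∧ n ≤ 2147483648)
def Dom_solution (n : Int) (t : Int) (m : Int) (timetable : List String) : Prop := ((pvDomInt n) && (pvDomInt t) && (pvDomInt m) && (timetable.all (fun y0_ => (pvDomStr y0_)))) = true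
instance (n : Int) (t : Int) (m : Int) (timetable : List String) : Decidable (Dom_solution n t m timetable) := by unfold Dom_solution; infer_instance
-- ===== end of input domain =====

-- B replaces A's crew-outer loop with an inner scan over all buses by one bus-outer
-- sweep consuming a prefix of the sorted crews per bus (asymptotically cheaper assignment).

-- shared helpers (identical lines in both Pythons): make_time and the crew-minute parse
def makeTime (tm : Int) : String :=
  String.ofList (PySem.Chars.zfill (PySem.Int.toChars (PySem.Int.floordiv tm 60)) 2
    ++ (':' :: PySem.Chars.zfill (PySem.Int.toChars (PySem.Int.mod tm 60)) 2))

-- 60*int(s[:2]) + int(s[3:]); the int() ValueError is excluded by Pre_ (getD 0 unreachable there)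
def crewMin (s : String) : Int :=
  60 * (PySem.Int.ofStr? (PySem.Str.slice s none (some 2))).getD 0
    + (PySem.Int.ofStr? (PySem.Str.slice s (some 3) none)).getD 0

-- ===== PORT A =====
-- 'for bus in buses: if crew <= bus and len(buses[bus]) < m: buses[bus].append(crew); break'
def placeCrew (m crew : Int) : List (Int × List Int) → List (Int × List Int)
  | [] => []
  | (b, v) :: rest =>
      if crew ≤ b ∧ (v.length : Int) < m then (b, v ++ [crew]) :: rest
      else (b, v) :: placeCrew m crew rest

-- 'buses[k] = []' on the insertion-ordered dict
def dictSetNil : List (Int × List Int) → Int → List (Int × List Int)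
  | [], k => [(k, [])]
  | (b, v) :: rest, k => if b = k then (b, []) :: rest else (b, v) :: dictSetNil rest k

-- 'buses[late_time]' (defaultdict: missing key reads as [])
def lookupD (d : List (Int × List Int)) (k : Int) : List Int :=
  match d.find? (fun e => e.1 == k) with
  | some e => e.2
  | none => []

def solution (n : Int) (t : Int) (m : Int) (timetable : List String) : String :=
  let crews := timetable.foldl (fun acc s => acc ++ [crewMin s]) []
  let crews := PySem.List.sorted crews (fun x => x) false
  let st := (PySem.List.pyRange 0 n 1).foldl
      (fun (st : List (Int × List Int) × List Int × Int) _ =>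
        (dictSetNil st.1 st.2.2, st.2.1 ++ [st.2.2], st.2.2 + t))
      ([], [], 60 * 9)
  let buses := crews.foldl (fun d crew => placeCrew m crew d) st.1
  let late := (PySem.List.pyGet? st.2.1 (-1)).getD 0   -- bus_timetable[-1]; IndexError excluded by Pre_
  let crew_list := lookupD buses late
  if (crew_list.length : Int) < m then makeTime late
  else if m = 1 then makeTime (PySem.List.pyGetD crew_list 0 0 - 1)
  else
    let time := PySem.List.pyGetD crew_list (m - 2) 0
    let time := if time < late then late else time
    if PySem.List.pyGetD crew_list (m - 1) 0 ≤ time then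
      makeTime (PySem.List.pyGetD crew_list (m - 1) 0 - 1)
    else makeTime time

-- ===== PORT B =====
-- 'while p < len(crews) and crews[p] <= bus and len(cur) < m: cur.append(crews[p]); p += 1'
def consume (b m : Int) (cur : List Int) : List Int → List Int × List Int
  | [] => (cur, [])
  | c :: cs => if c ≤ b ∧ (cur.length : Int) < m then consume b m (cur ++ [c]) cs
               else (cur, c :: cs)

-- 'for bus in bus_timetable: cur = fill from remaining crews; last_list = cur'
def sweep (m : Int) (acc : List Int) : List Int → List Int → List Int
  | [], _ => acc
  | b :: bs, crews =>
      let r := consume b m [] crews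
      sweep m r.1 bs r.2

def solution_alt (n : Int) (t : Int) (m : Int) (timetable : List String) : String :=
  let crews := PySem.List.sorted (timetable.map crewMin) (fun x => x) false
  let bus_timetable := (PySem.List.pyRange 0 n 1).map (fun i => 9 * 60 + t * i)
  let last_bus := (PySem.List.pyGet? bus_timetable (-1)).getD 0
  let last_list := sweep m [] bus_timetable crews
  if (last_list.length : Int) < m then makeTime last_bus
  else if m = 1 then makeTime (PySem.List.pyGetD last_list 0 0 - 1)
  else
    let time := max (PySem.List.pyGetD last_list (m - 2) 0) last_bus
    if PySem.List.pyGetD last_list (m - 1) 0 ≤ time then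
      makeTime (PySem.List.pyGetD last_list (m - 1) 0 - 1)
    else makeTime time

-- ===== PRECONDITION & SPEC =====
-- A returns exactly when n ≥ 1 (else bus_timetable[-1] raises IndexError), m ≥ 1 (else
-- crew_list[m-2] on the empty last list raises IndexError), and every timetable entry's two
-- int() calls succeed (else ValueError). Pre_ also excludes t = 0 with n ≥ 2, where all bus
-- times coincide and A's defaultdict collapses them into one key (one bus of capacity m)
-- while B keeps n simultaneous buses — a duplicate-key corner where either reading is
-- defensible (the problem's natural domain has t ≥ 1).
def Pre_solution (n : Int) (t : Int) (m : Int) (timetable : List String) : Prop :=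
  1 ≤ n ∧ 1 ≤ m ∧ ¬(t = 0 ∧ 2 ≤ n) ∧ ∀ s ∈ timetable,
    (PySem.Int.ofStr? (PySem.Str.slice s none (some 2))).isSome = true ∧
    (PySem.Int.ofStr? (PySem.Str.slice s (some 3) none)).isSome = true
instance (n : Int) (t : Int) (m : Int) (timetable : List String) : Decidable (Pre_solution n t m timetable) := by unfold Pre_solution; infer_instance

def pvWitness_solution : Int × Int × Int × List String := (2, 10, 2, ["09:00", "08:59", "09:05"])

def Spec_solution (n : Int) (t : Int) (m : Int) (timetable : List String) (out : String) : Prop := out = solution_alt n t m timetable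
instance (n : Int) (t : Int) (m : Int) (timetable : List String) (out : String) : Decidable (Spec_solution n t m timetable out) := by unfold Spec_solution; infer_instance

-- ===== CLAIM (what is proved, stated in full; the proofs are below) =====
def Claim_equal_solution : Prop := ∀ (n : Int) (t : Int) (m : Int) (timetable : List String), Dom_solution n t m timetable → Pre_solution n t m timetable → Spec_solution n t m timetable (solution n t m timetable)

-- ===== LEMMAS AND PROOFS =====

theorem foldl_place_nil (m : Int) (crews : List Int) :
    crews.foldl (fun d crew => placeCrew m crew d) [] = [] := by
  induction crews with
  | nil => rfl
  | cons c cs ih => simpa [placeCrew] using ih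

-- a bucket no crew of the list can enter is passed over by the whole crew loop
theorem foldl_place_skip (m b : Int) (v : List Int) (crews : List Int)
    (h : ∀ c ∈ crews, ¬(c ≤ b ∧ (v.length : Int) < m)) (rest : List (Int × List Int)) :
    crews.foldl (fun d crew => placeCrew m crew d) ((b, v) :: rest)
      = (b, v) :: crews.foldl (fun d crew => placeCrew m crew d) rest := by
  induction crews generalizing rest with
  | nil => rfl
  | cons c cs ih =>
      simp only [List.foldl_cons]
      rw [show placeCrew m c ((b, v) :: rest) = (b, v) :: placeCrew m c rest by
        simp [placeCrew, h c (List.mem_cons_self ..)]]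
      exact ih (fun x hx => h x (List.mem_cons_of_mem _ hx)) _

-- the heart: crew-outer first-fit on a sorted crew list fills the front bucket with exactly
-- the prefix B's 'consume' takes, and hands 'consume's remainder to the remaining buckets
theorem foldl_place_cons (m b : Int) (v : List Int) (crews : List Int)
    (hs : crews.Pairwise (· ≤ ·)) (rest : List (Int × List Int)) :
    crews.foldl (fun d crew => placeCrew m crew d) ((b, v) :: rest)
      = (b, (consume b m v crews).1)
          :: (consume b m v crews).2.foldl (fun d crew => placeCrew m crew d) rest := by
  induction crews generalizing v rest with
  | nil => rfl
  | cons c cs ih =>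
      rcases List.pairwise_cons.mp hs with ⟨hle, hcs⟩
      by_cases h : c ≤ b ∧ (v.length : Int) < m
      · simp only [List.foldl_cons, consume, if_pos h]
        rw [show placeCrew m c ((b, v) :: rest) = (b, v ++ [c]) :: rest by
          simp [placeCrew, h]]
        exact ih hcs (v := v ++ [c]) (rest := rest)
      · simp only [List.foldl_cons, consume, if_neg h]
        rw [show placeCrew m c ((b, v) :: rest) = (b, v) :: placeCrew m c rest by
          simp [placeCrew, h]]
        rw [foldl_place_skip m b v cs
          (by
            intro x hx hcontra
            rcases not_and_or.mp h with hcb | hvm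
            · exact hcb (le_trans (hle x hx) hcontra.1)
            · exact hvm hcontra.2) (placeCrew m c rest)]

theorem consume_snd_suffix (b m : Int) (cur : List Int) (crews : List Int) :
    (consume b m cur crews).2 <:+ crews := by
  induction crews generalizing cur with
  | nil => simp [consume]
  | cons c cs ih =>
      simp only [consume]
      split
      · exact (ih (cur ++ [c])).trans (List.suffix_cons c cs)
      · exact List.suffix_refl _

-- A's last-bus list, read from the assignment fold, is B's last sweep state
theorem lookup_fold_eq_sweep (m : Int) (order crews acc : List Int)
    (hne : order ≠ []) (hnd : order.Nodup) (hs : crews.Pairwise (· ≤ ·)) :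
    lookupD (crews.foldl (fun d crew => placeCrew m crew d)
        (order.map (fun b => (b, ([] : List Int))))) (order.getLast hne)
      = sweep m acc order crews := by
  induction order generalizing crews acc with
  | nil => exact absurd rfl hne
  | cons b bs ih =>
      rcases List.nodup_cons.mp hnd with ⟨hb, hnd'⟩
      simp only [List.map_cons, sweep]
      rw [foldl_place_cons m b [] crews hs]
      cases bs with
      | nil =>
          simp [lookupD, foldl_place_nil, List.getLast, sweep]
      | cons b' bs' =>
          have hlast : (b :: b' :: bs').getLast (by simp)
              = (b' :: bs').getLast (by simp) := by
            simp [List.getLast]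
          have hne' : b ≠ (b' :: bs').getLast (by simp) := by
            intro hc
            exact hb (hc ▸ List.getLast_mem _)
          have := ih ((consume b m [] crews).2) (consume b m [] crews).1
            (by simp) hnd'
            (hs.sublist (consume_snd_suffix b m [] crews).sublist)
          simp only [lookupD, List.find?_cons] at this ⊢
          rw [hlast, show (b == (b' :: bs').getLast (by simp)) = false from
            beq_eq_false_iff_ne.mpr hne']
          exact this

-- A's bus loop: dict/timetable/start after folding over any index list of the same length
def bseq (t s : Int) : List Int → List Int
  | [] => []
  | _ :: xs => s :: bseq t (s + t) xs

theorem loop1_eq (t : Int) (l : List Int) (d : List (Int × List Int)) (bt : List Int) (s : Int) :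
    l.foldl (fun (st : List (Int × List Int) × List Int × Int) _ =>
        (dictSetNil st.1 st.2.2, st.2.1 ++ [st.2.2], st.2.2 + t)) (d, bt, s)
      = ((bseq t s l).foldl dictSetNil d, bt ++ bseq t s l, s + t * l.length) := by
  induction l generalizing d bt s with
  | nil => simp [bseq]
  | cons x xs ih =>
      simp only [List.foldl_cons, bseq, ih, List.length_cons, Prod.mk.injEq]
      refine ⟨trivial, by simp, by push_cast; ring⟩

theorem bseq_pyRange (t : Int) : ∀ (k : Nat) (a b : Int), (b - a).toNat = k →
    bseq t (9 * 60 + t * a) (PySem.List.pyRange a b 1)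
      = (PySem.List.pyRange a b 1).map (fun i => 9 * 60 + t * i) := by
  intro k
  induction k with
  | zero =>
      intro a b hk
      rw [PySem.List.pyRange_one_eq_nil (by omega)]
      rfl
  | succ k ih =>
      intro a b hk
      rw [PySem.List.pyRange_one_cons (by omega)]
      simp only [bseq, List.map_cons]
      rw [show 9 * 60 + t * a + t = 9 * 60 + t * (a + 1) by ring, ih (a + 1) b (by omega)]

theorem dictSetNil_map_not_mem (us : List Int) (x : Int) (h : x ∉ us) :
    dictSetNil (us.map (fun b => (b, ([] : List Int)))) x
      = (us ++ [x]).map (fun b => (b, ([] : List Int))) := by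
  induction us with
  | nil => rfl
  | cons u us ihu =>
      have hux : ¬ u = x := fun hux => h (hux ▸ List.mem_cons_self ..)
      simp only [List.map_cons, dictSetNil, if_neg hux, List.cons_append]
      rw [ihu (fun hx => h (List.mem_cons_of_mem _ hx))]

-- building the dict over a duplicate-free key list is just the key list with empty buckets
theorem foldl_dictSetNil_nodup (ts us : List Int) (hnd : (us ++ ts).Nodup) :
    ts.foldl dictSetNil (us.map (fun b => (b, ([] : List Int))))
      = (us ++ ts).map (fun b => (b, ([] : List Int))) := by
  induction ts generalizing us with
  | nil => simp
  | cons x xs ih =>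
      simp only [List.foldl_cons]
      have hx : x ∉ us := by
        intro hmem
        exact (List.disjoint_of_nodup_append hnd) hmem (List.mem_cons_self ..)
      rw [dictSetNil_map_not_mem us x hx, ih (us ++ [x]) (by simpa using hnd)]
      simp

-- A's two-step clamp of 'time' is B's max
theorem clamp_eq_max (x late : Int) : (if x < late then late else x) = max x late := by
  by_cases h : x < late
  · simp [h, max_eq_right (le_of_lt h)]
  · simp [h, max_eq_left (not_lt.mp h)]

-- ===== VERDICT (by name: the statement is the Claim_ definition above) =====
theorem solution_spec : Claim_equal_solution := by
  intro n t m timetable _ hpre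
  obtain ⟨hn, hm, ht0, -⟩ := hpre
  show solution n t m timetable = solution_alt n t m timetable
  unfold solution solution_alt
  rw [PySem.List.foldl_append_singleton_eq_map, List.nil_append, loop1_eq,
    show (60 * 9 : Int) = 9 * 60 + t * 0 by ring,
    bseq_pyRange t (n - 0).toNat 0 n (by omega)]
  simp only [List.nil_append]
  set btB := (PySem.List.pyRange 0 n 1).map (fun i => 9 * 60 + t * i) with hbt
  set crews := PySem.List.sorted (timetable.map crewMin) (fun x => x) false with hcr
  have hbne : btB ≠ [] := by
    have hlen : btB.length = (n - 0).toNat := by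
      rw [hbt, List.length_map, PySem.List.length_pyRange_one]
    intro hnil
    rw [hnil] at hlen
    simp at hlen
    omega
  have hnd : btB.Nodup := by
    by_cases ht : t = 0
    · have hn1 : n = 1 := by omega
      subst ht hn1
      rw [hbt, PySem.List.pyRange_one_cons (by norm_num),
        PySem.List.pyRange_one_eq_nil (by norm_num)]
      simp
    · exact (PySem.List.nodup_pyRange_one 0 n).map
        (fun i j hij => by
          have : t * i = t * j := by omega
          exact mul_left_cancel₀ ht this)
  have hlateget : (PySem.List.pyGet? btB (-1)).getD 0 = btB.getLast hbne := by
    rw [PySem.List.pyGet?_neg_one, List.getLast?_eq_some_getLast hbne]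
    rfl
  rw [hlateget]
  have h0 : (btB.foldl dictSetNil ([] : List (Int × List Int)))
      = btB.map (fun b => (b, ([] : List Int))) := by
    simpa using foldl_dictSetNil_nodup btB [] (by simpa using hnd)
  rw [h0, lookup_fold_eq_sweep m btB crews [] hbne hnd
    (PySem.List.sorted_pairwise (timetable.map crewMin) (fun x => x)), clamp_eq_max]
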